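-- pv_equiv track=rewrite | github.com/biroc/algs | Google Foobar/access_codes.py | answer
-- ===== SOURCE A (Python) =====
-- def answer(x):
--     if not x:
--         return 0
--     strings = {}
--     count = 0
--     for s in x:
--         if s in strings or s[::-1] in strings:
--             continue
--         else:
--             strings[s] = True
--             strings[s[::-1]] = True
--             count += 1
--
--     return count
-- ===== SOURCE B (Python) =====
-- def answer(x):
--     return len({min(s, s[::-1]) for s in x})
-- ===== Notes on version B (the rewrite author's own statement) =====
-- stated objective: simpler
-- what changed: Replaces the seen-dict with skip/dual-insert/increment loop by counting distinct canonical representatives min(s, s[::-1]) in one set comprehension.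
import Mathlib
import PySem

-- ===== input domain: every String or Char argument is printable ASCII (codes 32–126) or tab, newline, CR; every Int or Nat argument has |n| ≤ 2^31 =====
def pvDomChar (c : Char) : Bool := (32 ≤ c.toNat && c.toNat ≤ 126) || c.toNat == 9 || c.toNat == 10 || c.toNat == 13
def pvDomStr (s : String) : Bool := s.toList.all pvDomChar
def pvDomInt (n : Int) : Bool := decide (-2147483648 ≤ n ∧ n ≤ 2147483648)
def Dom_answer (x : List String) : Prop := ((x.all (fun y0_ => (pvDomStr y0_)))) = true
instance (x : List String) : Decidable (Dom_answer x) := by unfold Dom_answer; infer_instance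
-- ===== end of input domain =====

-- B counts distinct canonical keys min(s, s[::-1]) instead of A's seen-dict loop; objective: simpler.

-- s[::-1] for a string
def pyrev (s : String) : String := String.ofList s.toList.reverse

-- ===== PORT A =====
def answer (x : List String) : Int :=
  if x = [] then 0
  else
    (x.foldl
      (fun (acc : PySem.Dict String Bool × Int) s =>
        if acc.1.contains s || acc.1.contains (pyrev s) then acc
        else ((acc.1.insert s true).insert (pyrev s) true, acc.2 + 1))
      (PySem.Dict.empty, 0)).2

-- ===== PORT B =====
def answer_alt (x : List String) : Int :=
  ((PySem.Set.ofList (x.map (fun s => min s (pyrev s)))).length : Int)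

-- ===== PRECONDITION & SPEC =====
def Spec_answer (x : List String) (out : Int) : Prop := out = answer_alt x
instance (x : List String) (out : Int) : Decidable (Spec_answer x out) := by unfold Spec_answer; infer_instance

-- ===== CLAIM (what is proved, stated in full; the proofs are below) =====
def Claim_equal_answer : Prop := ∀ (x : List String), Dom_answer x → Spec_answer x (answer x)

-- ===== LEMMAS AND PROOFS =====

theorem pyrev_pyrev (s : String) : pyrev (pyrev s) = s := by
  simp [pyrev]

-- the canonical representative of the class {s, reverse s}
theorem canon_eq_canon_iff (k s : String) :
    min k (pyrev k) = min s (pyrev s) ↔ (k = s ∨ k = pyrev s) := by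
  constructor
  · intro h
    rcases min_choice k (pyrev k) with hk | hk <;>
    rcases min_choice s (pyrev s) with hs | hs
    · left; rw [← hk, ← hs, h]
    · right; rw [← hs, ← h, hk]
    · right
      have : pyrev k = s := by rw [← hk, h, hs]
      rw [← this, pyrev_pyrev]
    · left
      have : pyrev k = pyrev s := by rw [← hk, h, hs]
      have := congrArg pyrev this
      rwa [pyrev_pyrev, pyrev_pyrev] at this
  · rintro (rfl | rfl)
    · rfl
    · rw [pyrev_pyrev, min_comm]

-- loop invariant: if the dict's keys are exactly the strings whose canonical key is
-- already in S, then A's loop counts exactly the new canonical keys of x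
theorem loop_inv (x : List String) (d : PySem.Dict String Bool) (c : Int)
    (S : PySem.Set String)
    (h : ∀ k, d.contains k = true ↔ min k (pyrev k) ∈ S) :
    (x.foldl
      (fun (acc : PySem.Dict String Bool × Int) s =>
        if acc.1.contains s || acc.1.contains (pyrev s) then acc
        else ((acc.1.insert s true).insert (pyrev s) true, acc.2 + 1))
      (d, c)).2
    = c + (((x.map (fun s => min s (pyrev s))).foldl PySem.Set.add S).length : Int)
        - (S.length : Int) := by
  induction x generalizing d c S with
  | nil => simp
  | cons s t ih =>
    simp only [List.foldl_cons, List.map_cons]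
    by_cases hm : min s (pyrev s) ∈ S
    · have hc : d.contains s = true ∨ d.contains (pyrev s) = true := by
        left; rw [h s]; exact hm
      have hcond : (d.contains s || d.contains (pyrev s)) = true := by
        rcases hc with hc | hc <;> simp [hc]
      rw [hcond, if_pos rfl, PySem.Set.add_of_mem hm]
      exact ih d c S h
    · have hcs : d.contains s = false := by
        rw [← Bool.not_eq_true, h s]; exact hm
      have hcr : d.contains (pyrev s) = false := by
        rw [← Bool.not_eq_true, h (pyrev s)]
        rw [pyrev_pyrev, min_comm]
        exact hm
      rw [hcs, hcr, Bool.or_self, if_neg (by simp)]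
      rw [PySem.Set.add_of_not_mem hm]
      have h' : ∀ k, ((d.insert s true).insert (pyrev s) true).contains k = true ↔
          min k (pyrev k) ∈ S ++ [min s (pyrev s)] := by
        intro k
        rw [PySem.Dict.contains_insert, PySem.Dict.contains_insert]
        simp only [Bool.or_eq_true, beq_iff_eq, h k, List.mem_append,
          List.mem_singleton, canon_eq_canon_iff k s]
        tauto
      rw [ih _ _ _ h']
      simp only [List.length_append, List.length_singleton]
      push_cast
      ring

-- ===== VERDICT (by name: the statement is the Claim_ definition above) =====
theorem answer_spec : Claim_equal_answer := by
  intro x _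
  unfold Spec_answer answer answer_alt
  by_cases hx : x = []
  · subst hx; simp [PySem.Set.ofList]
  · rw [if_neg hx]
    rw [loop_inv x PySem.Dict.empty 0 []
      (by intro k; simp [PySem.Dict.contains_empty])]
    rw [← PySem.Set.ofList_eq_foldl]
    simp
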